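-- pv_equiv track=rewrite | github.com/SimpleTheory/dart-dataclasses-engine | src/dart_dataclasses/domain.py | clean_generics_in_generics_string
-- ===== SOURCE A (Python) =====
-- def clean_generics_in_generics_string(generics_string: str) -> tuple[str, list[str]]:
--     bracket_cnt = 0
--     sub_generics = []
--     starts = []
--     ends = []
--     for index, char in enumerate(generics_string):
--         if char == '<':
--             if not bracket_cnt:
--                 starts.append(index)
--             bracket_cnt += 1
--         if char == '>':
--             bracket_cnt -= 1
--             if not bracket_cnt:
--                 ends.append(index)
--     for start, end in zip(starts, ends):
--         sub_generics.append(generics_string[start:end + 1])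
--     for index, sub_generic in enumerate(sub_generics):
--         generics_string = generics_string.replace(sub_generic, f'____sub_{index}____', 1)
--     return generics_string, sub_generics
-- ===== SOURCE B (Python) =====
-- def clean_generics_in_generics_string(generics_string: str) -> tuple[str, list[str]]:
--     # Single pass: jump to each '<' with str.find, walk to its matching '>',
--     # and splice text pieces and placeholders together with one join,
--     # instead of recording index lists and re-searching the whole string
--     # with repeated str.replace.
--     out = []
--     subs = []
--     n = len(generics_string)
--     i = 0
--     while i < n:
--         j = generics_string.find('<', i)
--         if j == -1:
--             out.append(generics_string[i:])
--             break
--         out.append(generics_string[i:j])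
--         depth = 1
--         k = j + 1
--         while k < n and depth:
--             c = generics_string[k]
--             if c == '<':
--                 depth += 1
--             elif c == '>':
--                 depth -= 1
--             k += 1
--         if depth:  # unclosed group: the rest is kept as plain text
--             out.append(generics_string[j:])
--             break
--         out.append(f'____sub_{len(subs)}____')
--         subs.append(generics_string[j:k])
--         i = k
--     return ''.join(out), subs
-- ===== Notes on version B (the rewrite author's own statement) =====
-- stated objective: faster
-- what changed: A records start/end index lists in one scan, slices the groups out, and then rewrites the string with one first-occurrence str.replace per group (each rescanning the whole string); B walks the string once, finds each top-level '<'s matching '>' directly, and splices placeholder and group out in a single pass joined at the end.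
-- outside the precondition, e.g. on clean_generics_in_generics_string('><a>'): A returns ('><a>', []), B returns ('>____sub_0____', ['<a>'])
import Mathlib
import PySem

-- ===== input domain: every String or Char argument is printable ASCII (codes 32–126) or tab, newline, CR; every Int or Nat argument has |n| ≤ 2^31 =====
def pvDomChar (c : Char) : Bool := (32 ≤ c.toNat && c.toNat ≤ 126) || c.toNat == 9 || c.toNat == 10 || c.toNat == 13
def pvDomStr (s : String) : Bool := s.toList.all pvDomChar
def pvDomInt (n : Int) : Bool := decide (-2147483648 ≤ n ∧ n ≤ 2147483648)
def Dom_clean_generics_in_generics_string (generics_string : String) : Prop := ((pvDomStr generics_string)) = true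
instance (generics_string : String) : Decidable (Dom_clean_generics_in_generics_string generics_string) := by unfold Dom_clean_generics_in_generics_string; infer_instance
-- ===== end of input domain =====

-- B replaces A's repeated first-occurrence str.replace pass with a single left-to-right
-- splice: it jumps to each top-level '<', walks to its matching '>', and joins the pieces
-- (objective: faster); return value only, no argument is mutated.


-- placeholder f'____sub_{k}____' (shared string-formatting helper of both ports)
def pvPh (k : Nat) : List Char :=
  ['_','_','_','_','s','u','b','_'] ++ PySem.Int.toChars (k : Int) ++ ['_','_','_','_']

-- ===== PORT A =====
-- first loop of A: state (bracket_cnt, starts, ends), index-carrying recursion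
def pvScanA : List Char → Nat → Int → Int × List Nat × List Nat
  | [], _, c => (c, [], [])
  | x :: xs, i, c =>
    -- if char == '<': (if not bracket_cnt: starts.append(index)); bracket_cnt += 1
    let s1 : List Nat := if x = '<' ∧ c = 0 then [i] else []
    let c1 : Int := if x = '<' then c + 1 else c
    -- if char == '>': bracket_cnt -= 1; (if not bracket_cnt: ends.append(index))
    let c2 : Int := if x = '>' then c1 - 1 else c1
    let e1 : List Nat := if x = '>' ∧ c2 = 0 then [i] else []
    let r := pvScanA xs (i + 1) c2
    (r.1, s1 ++ r.2.1, e1 ++ r.2.2)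

-- hand port of s.replace(sub, repl, 1): replace the FIRST occurrence only
-- (exact for count = 1, including Python's empty-sub rule "".replace("", r, 1) = r)
def pvReplace1 : List Char → List Char → List Char → List Char
  | [], sub, repl => if sub = [] then repl else []
  | x :: xs, sub, repl =>
    if sub.isPrefixOf (x :: xs) then repl ++ (x :: xs).drop sub.length
    else x :: pvReplace1 xs sub repl

-- third loop of A: for index, sub in enumerate(sub_generics): s = s.replace(sub, ph(index), 1)
def pvFoldRepl : List Char → List (List Char) → Nat → List Char
  | s, [], _ => s
  | s, g :: gs, k => pvFoldRepl (pvReplace1 s g (pvPh k)) gs (k + 1)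

def clean_generics_in_generics_string (generics_string : String) : String × List String :=
  let cs := generics_string.toList
  let sc := pvScanA cs 0 0
  let subs := (sc.2.1.zip sc.2.2).map
    (fun p => PySem.List.slice cs (some ((p.1 : Int))) (some ((p.2 : Int) + 1)))
  (String.ofList (pvFoldRepl cs subs 0), subs.map String.ofList)

-- ===== PORT B =====
-- inner while of Source B: from just after a '<' at depth d, consume up to and including
-- the matching '>' (none = it never closes); returns (consumed chars, remainder)
def pvGroup : List Char → Nat → Option (List Char × List Char)
  | [], _ => none
  | c :: cs, d =>
    if c = '>' ∧ d = 1 then some ([c], cs)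
    else
      let d' := if c = '<' then d + 1 else if c = '>' then d - 1 else d
      match pvGroup cs d' with
      | none => none
      | some (g, r) => some (c :: g, r)

-- termination measure for pvAltMain's group branch (cited in decreasing_by)
theorem pvGroup_rest_lt : ∀ (cs : List Char) (d : Nat) (g r : List Char),
    pvGroup cs d = some (g, r) → r.length < cs.length := by
  intro cs
  induction cs with
  | nil => intro d g r h; simp [pvGroup] at h
  | cons c cs ih =>
    intro d g r h
    simp only [pvGroup] at h
    split at h
    · cases h; simp
    · revert h
      cases hg : pvGroup cs (if c = '<' then d + 1 else if c = '>' then d - 1 else d) with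
      | none => intro h; simp at h
      | some p =>
        intro h
        simp at h
        have := ih _ p.1 p.2 (by simpa using hg)
        simp [← h.2]
        omega

-- outer while of Source B: text up to the next '<' (str.find) is copied as one piece,
-- then the group starting there is spliced out
def pvAltMain : List Char → Nat → List Char × List (List Char)
  | cs, k =>
    let t := cs.takeWhile (fun c => c != '<')            -- j = s.find('<', i)
    match hw : cs.dropWhile (fun c => c != '<') with
    | [] => (cs, [])                                     -- j == -1: the rest is text
    | _ :: u =>
      match hg : pvGroup u 1 with
      | none => (cs, [])                                 -- unclosed group: rest kept as text
      | some (g, r) =>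
        let p := pvAltMain r (k + 1)
        (t ++ pvPh k ++ p.1, ('<' :: g) :: p.2)
termination_by cs _ => cs.length
decreasing_by
  have h1 := List.length_dropWhile_le (fun c => c != '<') cs
  rw [hw] at h1
  have h2 := pvGroup_rest_lt _ _ _ _ hg
  simp at h1
  omega

def clean_generics_in_generics_string_alt (generics_string : String) : String × List String :=
  let p := pvAltMain generics_string.toList 0
  (String.ofList p.1, p.2.map String.ofList)

-- ===== PRECONDITION & SPEC =====
-- helper: every '<' is scanned at a non-negative bracket count
abbrev pvPreL (cs : List Char) : Prop :=
  ∀ i ∈ List.range cs.length, cs.getD i ' ' = '<' →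
    (cs.take i).count '>' ≤ (cs.take i).count '<'

-- Pre_ excludes strings in which some '<' follows a prefix holding more '>' than '<'
-- (stray unmatched '>'): there A's replace-by-first-occurrence can splice the placeholder
-- at an earlier identical text fragment instead of the scanned group — an accident of
-- str.replace on malformed input; B splices at the scanned group itself.
def Pre_clean_generics_in_generics_string (generics_string : String) : Prop :=
  pvPreL generics_string.toList
instance (generics_string : String) : Decidable (Pre_clean_generics_in_generics_string generics_string) := by
  unfold Pre_clean_generics_in_generics_string; infer_instance

def pvWitness_clean_generics_in_generics_string : String := "List<Map<A,B>>, Foo<C>"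

def Spec_clean_generics_in_generics_string (generics_string : String) (out : String × List String) : Prop := out = clean_generics_in_generics_string_alt generics_string
instance (generics_string : String) (out : String × List String) : Decidable (Spec_clean_generics_in_generics_string generics_string out) := by unfold Spec_clean_generics_in_generics_string; infer_instance

-- ===== CLAIM (what is proved, stated in full; the proofs are below) =====
def Claim_equal_clean_generics_in_generics_string : Prop := ∀ (generics_string : String), Dom_clean_generics_in_generics_string generics_string → Pre_clean_generics_in_generics_string generics_string → Spec_clean_generics_in_generics_string generics_string (clean_generics_in_generics_string generics_string)

-- ===== LEMMAS AND PROOFS =====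

-- the sub-generics A extracts (zip of recorded starts/ends, sliced out of cs)
def pvSubsList (cs : List Char) : List (List Char) :=
  ((pvScanA cs 0 0).2.1.zip (pvScanA cs 0 0).2.2).map
    (fun p => PySem.List.slice cs (some ((p.1 : Int))) (some ((p.2 : Int) + 1)))

-- scan lemmas
theorem pvScanA_append (xs : List Char) : ∀ (ys : List Char) (i : Nat) (c : Int),
    pvScanA (xs ++ ys) i c =
      ((pvScanA ys (i + xs.length) (pvScanA xs i c).1).1,
       (pvScanA xs i c).2.1 ++ (pvScanA ys (i + xs.length) (pvScanA xs i c).1).2.1,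
       (pvScanA xs i c).2.2 ++ (pvScanA ys (i + xs.length) (pvScanA xs i c).1).2.2) := by
  induction xs with
  | nil => intro ys i c; simp [pvScanA]
  | cons x xs ih =>
    intro ys i c
    simp only [List.cons_append, pvScanA, ih, List.length_cons]
    have : i + 1 + xs.length = i + (xs.length + 1) := by omega
    simp [this, List.append_assoc]

theorem pvScanA_neutral (xs : List Char) (h : ∀ x ∈ xs, x ≠ '<' ∧ x ≠ '>') :
    ∀ (i : Nat) (c : Int), pvScanA xs i c = (c, [], []) := by
  induction xs with
  | nil => intro i c; simp [pvScanA]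
  | cons x xs ih =>
    intro i c
    have hx := h x (by simp)
    have htail := ih (fun y hy => h y (List.mem_cons_of_mem _ hy)) (i+1) c
    simp only [pvScanA]
    simp [hx.1, hx.2, htail]

theorem pvScanA_no_lt (xs : List Char) (h : ∀ x ∈ xs, x ≠ '<') :
    ∀ (i : Nat) (c : Int), c ≤ 0 →
      (pvScanA xs i c).2.1 = [] ∧ (pvScanA xs i c).2.2 = [] := by
  induction xs with
  | nil => intro i c _; simp [pvScanA]
  | cons x xs ih =>
    intro i c hc
    have hx := h x (by simp)
    have htail := ih (fun y hy => h y (List.mem_cons_of_mem _ hy))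
    by_cases hgt : x = '>'
    · subst hgt
      have hne : ¬ (c - 1 = 0) := by omega
      simp only [pvScanA]
      simp [hx, hne, (htail (i+1) (c-1) (by omega)).1, (htail (i+1) (c-1) (by omega)).2]
    · simp only [pvScanA]
      simp [hx, hgt, (htail (i+1) c hc).1, (htail (i+1) c hc).2]

theorem pvScanA_shift (xs : List Char) : ∀ (j i : Nat) (c : Int),
    pvScanA xs (i + j) c =
      ((pvScanA xs j c).1, (pvScanA xs j c).2.1.map (· + i), (pvScanA xs j c).2.2.map (· + i)) := by
  induction xs with
  | nil => intro j i c; simp [pvScanA]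
  | cons x xs ih =>
    intro j i c
    have harith : i + j + 1 = i + (j + 1) := by omega
    simp only [pvScanA, harith, ih (j+1) i]
    refine Prod.ext rfl (Prod.ext ?_ ?_) <;>
      simp only [List.map_append] <;> split_ifs <;> simp <;> omega

-- group lemmas
theorem pvGroup_cases (c : Char) (u : List Char) (d : Nat) (g r : List Char)
    (hcd : ¬ (c = '>' ∧ d = 1))
    (h : pvGroup (c :: u) d = some (g, r)) :
    ∃ p : List Char × List Char,
      pvGroup u (if c = '<' then d + 1 else if c = '>' then d - 1 else d) = some p ∧
      g = c :: p.1 ∧ r = p.2 := by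
  simp only [pvGroup, if_neg hcd] at h
  revert h
  cases hg : pvGroup u (if c = '<' then d + 1 else if c = '>' then d - 1 else d) with
  | none => intro h; simp at h
  | some p =>
    intro h
    simp only [Option.some.injEq] at h
    obtain ⟨h1, h2⟩ := Prod.ext_iff.mp h
    simp only at h1 h2
    exact ⟨p, rfl, h1.symm, h2.symm⟩

theorem pvGroup_sound : ∀ (u : List Char) (d : Nat) (g r : List Char), 1 ≤ d →
    pvGroup u d = some (g, r) →
    u = g ++ r ∧ g.count '>' = g.count '<' + d ∧
      (∀ i : Nat, pvScanA g i (d : Int) = (0, [], [i + g.length - 1])) := by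
  intro u
  induction u with
  | nil => intro d g r _ h; simp [pvGroup] at h
  | cons c u ih =>
    intro d g r hd h
    by_cases hcd : c = '>' ∧ d = 1
    · obtain ⟨rfl, rfl⟩ := hcd
      simp only [pvGroup, and_self, if_pos, Option.some.injEq] at h
      obtain ⟨h1, h2⟩ := Prod.ext_iff.mp h
      simp only at h1 h2
      subst h1; subst h2
      exact ⟨by simp, by simp, fun i => by simp [pvScanA]⟩
    · obtain ⟨p, hg, rfl, rfl⟩ := pvGroup_cases c u d g r hcd h
      by_cases h1 : c = '<'
      · subst h1
        rw [if_pos rfl] at hg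
        obtain ⟨hu, hcount, hscan⟩ := ih (d + 1) p.1 p.2 (by omega) hg
        refine ⟨by simp [hu], by simp [List.count_cons] <;> omega, ?_⟩
        intro i
        have hs := hscan (i + 1)
        have hcast : (((d + 1 : Nat)) : Int) = (d : Int) + 1 := by push_cast; ring
        rw [hcast] at hs
        have hdz : ¬ ((d : Int) = 0) := by omega
        have harith : i + 1 + p.1.length - 1 = i + ('<' :: p.1).length - 1 := by
          simp only [List.length_cons]; omega
        simp [pvScanA, hdz, hs, harith] <;> omega
      · by_cases h2 : c = '>'
        · subst h2
          rw [if_neg h1, if_pos rfl] at hg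
          have hdne : d ≠ 1 := fun hh => hcd ⟨rfl, hh⟩
          obtain ⟨hu, hcount, hscan⟩ := ih (d - 1) p.1 p.2 (by omega) hg
          refine ⟨by simp [hu], by simp [List.count_cons] <;> omega, ?_⟩
          intro i
          have hs := hscan (i + 1)
          have hcast : (((d - 1 : Nat)) : Int) = (d : Int) - 1 := by omega
          rw [hcast] at hs
          have hdz : ¬ ((d : Int) - 1 = 0) := by omega
          have harith : i + 1 + p.1.length - 1 = i + ('>' :: p.1).length - 1 := by
            simp only [List.length_cons]; omega
          simp [pvScanA, hdz, hs, harith] <;> omega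
        · rw [if_neg h1, if_neg h2] at hg
          obtain ⟨hu, hcount, hscan⟩ := ih d p.1 p.2 hd hg
          refine ⟨by simp [hu], by simp [List.count_cons, h1, h2] <;> omega, ?_⟩
          intro i
          have hs := hscan (i + 1)
          have harith : i + 1 + p.1.length - 1 = i + (c :: p.1).length - 1 := by
            simp only [List.length_cons]; omega
          simp [pvScanA, h1, h2, hs, harith] <;> omega

theorem pvGroup_none : ∀ (u : List Char) (d : Nat), 1 ≤ d → pvGroup u d = none →
    ∀ i : Nat, (pvScanA u i (d : Int)).2.1 = [] ∧ (pvScanA u i (d : Int)).2.2 = [] := by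
  intro u
  induction u with
  | nil => intro d _ _ i; simp [pvScanA]
  | cons c u ih =>
    intro d hd h i
    by_cases hcd : c = '>' ∧ d = 1
    · obtain ⟨rfl, rfl⟩ := hcd
      simp [pvGroup] at h
    · have hg : pvGroup u (if c = '<' then d + 1 else if c = '>' then d - 1 else d) = none := by
        cases hgc : pvGroup u (if c = '<' then d + 1 else if c = '>' then d - 1 else d) with
        | none => rfl
        | some p =>
          simp only [pvGroup, if_neg hcd] at h
          rw [hgc] at h; simp at h
      by_cases h1 : c = '<'
      · subst h1
        rw [if_pos rfl] at hg
        have hrec := ih (d + 1) (by omega) hg (i + 1)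
        have hcast : (((d + 1 : Nat)) : Int) = (d : Int) + 1 := by push_cast; ring
        rw [hcast] at hrec
        have hdz : ¬ ((d : Int) = 0) := by omega
        simp [pvScanA, hdz, hrec.1, hrec.2] <;> omega
      · by_cases h2 : c = '>'
        · subst h2
          rw [if_neg h1, if_pos rfl] at hg
          have hdne : d ≠ 1 := fun hh => hcd ⟨rfl, hh⟩
          have hrec := ih (d - 1) (by omega) hg (i + 1)
          have hcast : (((d - 1 : Nat)) : Int) = (d : Int) - 1 := by omega
          rw [hcast] at hrec
          have hdz : ¬ ((d : Int) - 1 = 0) := by omega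
          simp [pvScanA, hdz, hrec.1, hrec.2] <;> omega
        · rw [if_neg h1, if_neg h2] at hg
          have hrec := ih d hd hg (i + 1)
          simp [pvScanA, h1, h2, hrec.1, hrec.2] <;> omega

-- replace-first lemmas
theorem pvReplace1_skip (p : List Char) (hp : ∀ x ∈ p, x ≠ '<') :
    ∀ (v sub repl : List Char), sub.head? = some '<' →
      pvReplace1 (p ++ v) sub repl = p ++ pvReplace1 v sub repl := by
  induction p with
  | nil => intro v sub repl _; simp
  | cons x p ih =>
    intro v sub repl hsub
    cases sub with
    | nil => simp at hsub
    | cons s sub' =>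
      simp only [List.head?_cons, Option.some.injEq] at hsub
      subst hsub
      have hx := hp x (by simp)
      have hpre : ('<' :: sub').isPrefixOf (x :: (p ++ v)) = false := by
        simp [List.isPrefixOf]
        intro hh
        exact absurd hh.symm hx
      simp only [List.cons_append, pvReplace1, hpre]
      simp only [Bool.false_eq_true, if_false]
      rw [ih (fun y hy => hp y (List.mem_cons_of_mem _ hy)) v _ repl rfl]

theorem pvReplace1_hit (g r repl : List Char) (hg : g ≠ []) :
    pvReplace1 (g ++ r) g repl = repl ++ r := by
  cases g with
  | nil => simp at hg
  | cons c g' =>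
    have hpre : (c :: g').isPrefixOf ((c :: g') ++ r) = true :=
      List.isPrefixOf_iff_prefix.mpr (List.prefix_append _ _)
    simp only [List.cons_append] at hpre ⊢
    rw [pvReplace1, if_pos hpre]
    have : (c :: (g' ++ r)).drop (c :: g').length = r := by
      have := List.drop_left (l₁ := c :: g') (l₂ := r)
      simpa using this
    rw [this]

theorem pvFoldRepl_skip : ∀ (gs : List (List Char)) (p v : List Char) (k : Nat),
    (∀ g ∈ gs, g.head? = some '<') → (∀ x ∈ p, x ≠ '<') →
    pvFoldRepl (p ++ v) gs k = p ++ pvFoldRepl v gs k := by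
  intro gs
  induction gs with
  | nil => intro p v k _ _; simp [pvFoldRepl]
  | cons g gs ih =>
    intro p v k hh hp
    simp only [pvFoldRepl]
    rw [pvReplace1_skip p hp v g (pvPh k) (hh g (by simp))]
    exact ih p _ (k+1) (fun g' hg' => hh g' (List.mem_cons_of_mem _ hg')) hp

-- alt lemmas
theorem pvAltMain_eq_nil (cs : List Char) (k : Nat)
    (h : cs.dropWhile (fun c => c != '<') = []) : pvAltMain cs k = (cs, []) := by
  rw [pvAltMain]
  split
  · rfl
  · simp_all

theorem pvAltMain_no_lt (cs : List Char) (h : ∀ x ∈ cs, x ≠ '<') (k : Nat) :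
    pvAltMain cs k = (cs, []) := by
  apply pvAltMain_eq_nil
  rw [List.dropWhile_eq_nil_iff]
  intro x hx
  simpa using h x hx

theorem pvAltMain_eq_none (cs u : List Char) (k : Nat)
    (hw : cs.dropWhile (fun c => c != '<') = '<' :: u)
    (hg : pvGroup u 1 = none) : pvAltMain cs k = (cs, []) := by
  rw [pvAltMain]
  split
  · rfl
  · rename_i y u' hw'
    rw [hw] at hw'
    obtain ⟨rfl, rfl⟩ : '<' = y ∧ u = u' := by
      have := List.cons.inj hw'; exact ⟨this.1, this.2⟩
    split
    · rfl
    · rename_i g r hg'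
      rw [hg] at hg'
      simp at hg'

theorem pvAltMain_eq_some (cs u g r : List Char) (k : Nat)
    (hw : cs.dropWhile (fun c => c != '<') = '<' :: u)
    (hg : pvGroup u 1 = some (g, r)) :
    pvAltMain cs k =
      (cs.takeWhile (fun c => c != '<') ++ (pvPh k ++ (pvAltMain r (k + 1)).1),
       ('<' :: g) :: (pvAltMain r (k + 1)).2) := by
  rw [pvAltMain]
  split
  · simp_all
  · rename_i y u' hw'
    rw [hw] at hw'
    obtain ⟨rfl, rfl⟩ : '<' = y ∧ u = u' := by
      have := List.cons.inj hw'; exact ⟨this.1, this.2⟩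
    split
    · simp_all
    · rename_i g' r' hg'
      rw [hg] at hg'
      obtain ⟨h1, h2⟩ := Prod.ext_iff.mp (Option.some.inj hg')
      simp only at h1 h2
      subst h1; subst h2
      simp [List.append_assoc]

theorem pvAltMain_subs_head : ∀ (cs : List Char) (k : Nat) (g : List Char),
    g ∈ (pvAltMain cs k).2 → g.head? = some '<' := by
  intro cs k
  induction cs, k using pvAltMain.induct with
  | case1 cs d hw => intro g h; rw [pvAltMain_eq_nil cs d hw] at h; simp at h
  | case2 cs d y u hw hg =>
    intro g h
    have hy : y = '<' := by
      have h2 : (cs.dropWhile (fun c => c != '<')).head? = some y := by rw [hw]; rfl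
      have := List.head?_dropWhile_not (fun c => c != '<') cs
      rw [h2] at this
      simpa using this
    subst hy
    rw [pvAltMain_eq_none cs u d hw hg] at h
    simp at h
  | case3 cs d y u hw g r hg ih =>
    intro g' h
    have hy : y = '<' := by
      have h2 : (cs.dropWhile (fun c => c != '<')).head? = some y := by rw [hw]; rfl
      have := List.head?_dropWhile_not (fun c => c != '<') cs
      rw [h2] at this
      simpa using this
    subst hy
    rw [pvAltMain_eq_some cs u g r d hw hg] at h
    simp only at h
    rcases List.mem_cons.mp h with h1 | h1
    · subst h1; rfl
    · exact ih g' h1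

-- precondition lemmas
theorem pvPreL_suffix (p r : List Char) (hbal : p.count '<' = p.count '>') 
    (h : pvPreL (p ++ r)) : pvPreL r := by
  intro i hi hc
  have hi' : i < r.length := List.mem_range.mp hi
  have h2 := h (p.length + i) (List.mem_range.mpr (by simp; omega))
  have hget : (p ++ r).getD (p.length + i) ' ' = r.getD i ' ' := by
    simp only [List.getD_eq_getElem?_getD]
    rw [List.getElem?_append_right (by omega)]
    simp
  rw [hget] at h2
  have htake : (p ++ r).take (p.length + i) = p ++ r.take i := List.take_length_add_append i
  rw [htake, List.count_append, List.count_append] at h2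
  have := h2 hc
  omega

theorem pvPreL_no_gt (t u : List Char) (ht : ∀ x ∈ t, x ≠ '<')
    (h : pvPreL (t ++ '<' :: u)) : ∀ x ∈ t, x ≠ '>' := by
  have hget : (t ++ '<' :: u).getD t.length ' ' = '<' := by
    simp only [List.getD_eq_getElem?_getD]
    rw [List.getElem?_append_right (by omega)]
    simp
  have h2 := h t.length (List.mem_range.mpr (by simp)) hget
  rw [List.take_left] at h2
  have hlt : t.count '<' = 0 := List.count_eq_zero.mpr (fun hmem => ht '<' hmem rfl)
  rw [hlt] at h2
  intro x hx hgt
  have : 0 < t.count '>' := List.count_pos_iff.mpr (hgt ▸ hx)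
  omega

-- slice lemmas
theorem pvSlice_pair (cs : List Char) (s e : Nat) :
    PySem.List.slice cs (some ((s : Nat) : Int)) (some (((e : Nat) : Int) + 1)) =
      (cs.drop s).take (e + 1 - s) := by
  have h1 : (((e : Nat) : Int) + 1) = (((e + 1 : Nat)) : Int) := by push_cast; ring
  rw [h1, PySem.List.slice_natCast]

theorem pvSlice_group (t G r : List Char) (hG : G ≠ []) :
    PySem.List.slice (t ++ G ++ r) (some ((t.length : Nat) : Int))
      (some (((t.length + G.length - 1 : Nat) : Int) + 1)) = G := by
  cases G with
  | nil => exact absurd rfl hG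
  | cons a G' =>
    rw [pvSlice_pair]
    have h1 : t.length + (a :: G').length - 1 + 1 - t.length = (a :: G').length := by
      simp only [List.length_cons]; omega
    rw [h1]
    rw [List.append_assoc, List.drop_left, List.take_left]

theorem pvSlice_shift (p v : List Char) (a b : Nat) :
    PySem.List.slice (p ++ v) (some (((p.length + a : Nat)) : Int))
      (some (((p.length + b : Nat) : Int) + 1)) =
    PySem.List.slice v (some ((a : Nat) : Int)) (some (((b : Nat) : Int) + 1)) := by
  rw [pvSlice_pair, pvSlice_pair]
  rw [List.drop_length_add_append]
  congr 1
  omega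

-- digit lemmas for the placeholder
theorem pvDigitChar_ne (m : Nat) : Nat.digitChar m ≠ '<' := by
  by_cases h0 : m = 0; · subst h0; decide
  by_cases h1 : m = 1; · subst h1; decide
  by_cases h2 : m = 2; · subst h2; decide
  by_cases h3 : m = 3; · subst h3; decide
  by_cases h4 : m = 4; · subst h4; decide
  by_cases h5 : m = 5; · subst h5; decide
  by_cases h6 : m = 6; · subst h6; decide
  by_cases h7 : m = 7; · subst h7; decide
  by_cases h8 : m = 8; · subst h8; decide
  by_cases h9 : m = 9; · subst h9; decide
  by_cases h10 : m = 10; · subst h10; decide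
  by_cases h11 : m = 11; · subst h11; decide
  by_cases h12 : m = 12; · subst h12; decide
  by_cases h13 : m = 13; · subst h13; decide
  by_cases h14 : m = 14; · subst h14; decide
  by_cases h15 : m = 15; · subst h15; decide
  simp [Nat.digitChar, h0,h1,h2,h3,h4,h5,h6,h7,h8,h9,h10,h11,h12,h13,h14,h15]

theorem pvToDigitsCore_no_lt (f : Nat) : ∀ (n : Nat) (acc : List Char),
    (∀ c ∈ acc, c ≠ '<') → ∀ c ∈ Nat.toDigitsCore 10 f n acc, c ≠ '<' := by
  induction f with
  | zero => intro n acc hacc; simpa [Nat.toDigitsCore] using hacc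
  | succ f ih =>
    intro n acc hacc c hc
    rw [Nat.toDigitsCore] at hc
    by_cases h : n / 10 = 0
    · simp only [h] at hc
      rcases List.mem_cons.mp hc with h1 | h1
      · subst h1; exact pvDigitChar_ne _
      · exact hacc _ h1
    · simp only [if_neg h] at hc
      refine ih _ _ ?_ _ hc
      intro d hd
      rcases List.mem_cons.mp hd with h1 | h1
      · subst h1; exact pvDigitChar_ne _
      · exact hacc _ h1

theorem pvPh_no_lt (k : Nat) : ∀ x ∈ pvPh k, x ≠ '<' := by
  intro x hx
  simp only [pvPh, List.mem_append] at hx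
  rcases hx with (hx | hx) | hx
  · simp at hx
    rcases hx with rfl | rfl | rfl | rfl | rfl <;> decide
  · intro hlt
    subst hlt
    have : ¬ ((k : Int) < 0) := by omega
    simp only [PySem.Int.toChars, if_neg this] at hx
    exact pvToDigitsCore_no_lt _ _ _ (by simp) _ hx rfl
  · simp at hx; subst hx; decide

-- pvScanA at a top-level '<'
theorem pvScanA_lt (u : List Char) (i : Nat) :
    pvScanA ('<' :: u) i 0 =
      ((pvScanA u (i + 1) 1).1, i :: (pvScanA u (i + 1) 1).2.1, (pvScanA u (i + 1) 1).2.2) := by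
  simp [pvScanA]

-- the main induction: A's fold-of-replaces and subs list against B's single pass
theorem pvCore : ∀ (n : Nat) (cs : List Char), cs.length ≤ n → pvPreL cs → ∀ k : Nat,
    pvFoldRepl cs (pvSubsList cs) k = (pvAltMain cs k).1 ∧
      pvSubsList cs = (pvAltMain cs k).2 := by
  intro n
  induction n with
  | zero =>
    intro cs hlen _ k
    have : cs = [] := List.length_eq_zero_iff.mp (Nat.le_zero.mp hlen)
    subst this
    simp [pvSubsList, pvScanA, pvFoldRepl, pvAltMain]
  | succ n ih =>
    intro cs hlen hpre k
    -- split cs at the first '<'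
    set t := cs.takeWhile (fun c => c != '<') with hT
    set w := cs.dropWhile (fun c => c != '<') with hW
    have hsplit : t ++ w = cs := List.takeWhile_append_dropWhile
    have ht : ∀ x ∈ t, x ≠ '<' := by
      intro x hx
      have := List.mem_takeWhile_imp (hT ▸ hx)
      simpa using this
    cases hw : w with
    | nil =>
      -- no '<' anywhere: A records nothing, B copies the text
      rw [hw] at hsplit
      simp only [List.append_nil] at hsplit
      have hnolt : ∀ x ∈ cs, x ≠ '<' := by rw [← hsplit]; exact ht
      have hscan := pvScanA_no_lt cs hnolt 0 0 (by omega)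
      have hsubs : pvSubsList cs = [] := by
        simp [pvSubsList, hscan.1]
      rw [hsubs, pvAltMain_no_lt cs hnolt k]
      exact ⟨rfl, rfl⟩
    | cons y u =>
      have hy : y = '<' := by
        have h2 : (cs.dropWhile (fun c => c != '<')).head? = some y := by
          rw [← hW, hw]; rfl
        have := List.head?_dropWhile_not (fun c => c != '<') cs
        rw [h2] at this
        simpa using this
      subst hy
      have hcs : cs = t ++ '<' :: u := by rw [← hsplit, hw]
      have hnogt : ∀ x ∈ t, x ≠ '>' := pvPreL_no_gt t u ht (hcs ▸ hpre)
      have hneutral : ∀ x ∈ t, x ≠ '<' ∧ x ≠ '>' := fun x hx => ⟨ht x hx, hnogt x hx⟩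
      have htscan := pvScanA_neutral t hneutral 0 0
      cases hgr : pvGroup u 1 with
      | none =>
        -- the group never closes: A pairs nothing, B keeps the rest as text
        have hnone := pvGroup_none u 1 (by omega) hgr (t.length + 1)
        rw [Nat.cast_one] at hnone
        have hscan_cs : (pvScanA cs 0 0).2.1 = [t.length] ∧ (pvScanA cs 0 0).2.2 = [] := by
          rw [hcs, pvScanA_append t ('<' :: u) 0 0, htscan]
          simp only [Nat.zero_add]
          rw [pvScanA_lt u t.length]
          exact ⟨by simp [hnone.1], by simp [hnone.2]⟩
        have hsubs : pvSubsList cs = [] := by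
          simp [pvSubsList, hscan_cs.1, hscan_cs.2]
        have hwd : cs.dropWhile (fun c => c != '<') = '<' :: u := by rw [← hW, hw]
        rw [hsubs, pvAltMain_eq_none cs u k hwd hgr]
        exact ⟨rfl, rfl⟩
      | some p =>
        obtain ⟨g', r⟩ := p
        obtain ⟨hu, hcount, hgscan⟩ := pvGroup_sound u 1 g' r (by omega) hgr
        have hg'ne : g' ≠ [] := by
          intro hnil
          rw [hnil] at hcount
          simp at hcount
        -- A's scan of cs
        have hscan_u := hgscan (t.length + 1)
        rw [Nat.cast_one] at hscan_u
        have hscan_cs : pvScanA cs 0 0 =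
            ((pvScanA r 0 0).1,
             t.length :: (pvScanA r 0 0).2.1.map (· + (t.length + 1 + g'.length)),
             (t.length + g'.length) :: (pvScanA r 0 0).2.2.map (· + (t.length + 1 + g'.length))) := by
          rw [hcs, pvScanA_append t ('<' :: u) 0 0, htscan]
          simp only [Nat.zero_add]
          rw [pvScanA_lt u t.length]
          rw [hu, pvScanA_append g' r (t.length + 1) 1]
          rw [hscan_u]
          simp only []
          have hshift := pvScanA_shift r 0 (t.length + 1 + g'.length) 0
          rw [Nat.add_zero] at hshift
          rw [hshift]
          have harith : t.length + 1 + g'.length - 1 = t.length + g'.length := by omega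
          simp [harith]
        -- A's subs list
        have hsubs_cs : pvSubsList cs = ('<' :: g') :: pvSubsList r := by
          rw [pvSubsList, hscan_cs]
          simp only [List.zip_cons_cons, List.zip_map, List.map_cons, List.map_map]
          congr 1
          · -- the first slice is the group itself
            have hGr : cs = t ++ ('<' :: g') ++ r := by
              rw [hcs, hu]; simp
            have hlen1 : t.length + g'.length = t.length + ('<' :: g').length - 1 := by
              simp only [List.length_cons]; omega
            rw [hGr, hlen1]
            exact pvSlice_group t ('<' :: g') r (by simp)
          · -- the remaining slices live inside r
            rw [pvSubsList]
            apply List.map_congr_left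
            intro p _
            simp only [Function.comp, Prod.map]
            have hGr : cs = (t ++ '<' :: g') ++ r := by
              rw [hcs, hu]; simp
            have hO : t.length + 1 + g'.length = (t ++ '<' :: g').length := by
              simp only [List.length_append, List.length_cons]; omega
            have h1 : p.1 + (t.length + 1 + g'.length) = (t ++ '<' :: g').length + p.1 := by
              omega
            have h2 : p.2 + (t.length + 1 + g'.length) = (t ++ '<' :: g').length + p.2 := by
              omega
            rw [hGr, h1, h2]
            exact pvSlice_shift (t ++ '<' :: g') r p.1 p.2
        -- precondition and length for the recursive call
        have hbal : (t ++ '<' :: g').count '<' = (t ++ '<' :: g').count '>' := by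
          have h1 : t.count '<' = 0 := List.count_eq_zero.mpr (fun hm => ht '<' hm rfl)
          have h2 : t.count '>' = 0 := List.count_eq_zero.mpr (fun hm => hnogt '>' hm rfl)
          simp [List.count_append, List.count_cons, h1, h2]
          omega
        have hpre_r : pvPreL r := by
          apply pvPreL_suffix (t ++ '<' :: g') r hbal
          have : (t ++ '<' :: g') ++ r = cs := by rw [hcs, hu]; simp
          rw [this]; exact hpre
        have hlen_r : r.length ≤ n := by
          have : cs.length = t.length + 1 + (g'.length + r.length) := by
            rw [hcs, hu]; simp; omega
          omega
        have IH := ih r hlen_r hpre_r (k + 1)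
        -- B's value
        have hwd : cs.dropWhile (fun c => c != '<') = '<' :: u := by rw [← hW, hw]
        have halt : pvAltMain cs k =
            (t ++ (pvPh k ++ (pvAltMain r (k + 1)).1),
             ('<' :: g') :: (pvAltMain r (k + 1)).2) := by
          rw [pvAltMain_eq_some cs u g' r k hwd hgr, ← hT]
        -- A's fold of replaces
        have hfold : pvFoldRepl cs (pvSubsList cs) k = t ++ (pvPh k ++ (pvAltMain r (k + 1)).1) := by
          rw [hsubs_cs]
          simp only [pvFoldRepl]
          have hrepl : pvReplace1 cs ('<' :: g') (pvPh k) = (t ++ pvPh k) ++ r := by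
            have hGr : cs = t ++ (('<' :: g') ++ r) := by rw [hcs, hu]; simp
            rw [hGr, pvReplace1_skip t ht (('<' :: g') ++ r) ('<' :: g') (pvPh k) rfl]
            rw [pvReplace1_hit ('<' :: g') r (pvPh k) (by simp)]
            simp
          rw [hrepl]
          have hheads : ∀ g ∈ pvSubsList r, g.head? = some '<' := by
            rw [IH.2]
            intro g hg
            exact pvAltMain_subs_head r (k + 1) g hg
          have hnoplt : ∀ x ∈ t ++ pvPh k, x ≠ '<' := by
            intro x hx
            rcases List.mem_append.mp hx with h1 | h1
            · exact ht x h1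
            · exact pvPh_no_lt k x h1
          rw [pvFoldRepl_skip (pvSubsList r) (t ++ pvPh k) r (k + 1) hheads hnoplt]
          rw [IH.1]
          simp
        refine ⟨?_, ?_⟩
        · rw [hfold, halt]
        · rw [hsubs_cs, halt]
          simp only [List.cons.injEq, true_and]
          exact IH.2

-- ===== VERDICT (by name: the statement is the Claim_ definition above) =====
theorem clean_generics_in_generics_string_spec : Claim_equal_clean_generics_in_generics_string := by
  intro s _ hpre
  unfold Spec_clean_generics_in_generics_string
  unfold Pre_clean_generics_in_generics_string at hpre
  have hcore := pvCore s.toList.length s.toList le_rfl hpre 0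
  show (String.ofList (pvFoldRepl s.toList (pvSubsList s.toList) 0),
        (pvSubsList s.toList).map String.ofList) =
       (String.ofList (pvAltMain s.toList 0).1, (pvAltMain s.toList 0).2.map String.ofList)
  rw [hcore.1, hcore.2]
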